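-- pv_equiv track=rewrite | github.com/jason-rietzke/AoC-2021 | Dec.08/puzzle_02.py | decode_digit
-- ===== SOURCE A (Python) =====
-- def decode_digit(digit, pattern):
-- 	digit_letters = [letter for letter in digit]
-- 	slotted_pattern = []
-- 	for i in range(len(pattern)):
-- 		slotted_pattern.append([])
-- 		for j in range(len(pattern[i])):
-- 			slotted_pattern[i].append(pattern[i][j])
--
-- 	output = ""
-- 	for i in range(len(slotted_pattern)):
-- 		pattern = slotted_pattern[i][:]
-- 		if len(pattern) != len(digit_letters):
-- 			continue
-- 		for letter in digit_letters:
-- 			if letter in pattern: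
-- 				pattern.remove(letter)
-- 			else:
-- 				break
--
-- 		if len(pattern) == 0:
-- 			output += str(i)
--
-- 	return output
-- ===== SOURCE B (Python) =====
-- def decode_digit(digit, pattern):
-- 	key = sorted(digit)
-- 	return "".join(str(i) for i, p in enumerate(pattern) if sorted(p) == key)
-- ===== Notes on version B (the rewrite author's own statement) =====
-- stated objective: simpler
-- what changed: Replaces A's explicit pattern re-copying, length guard and destructive char-by-char remove loop with a precomputed sorted(digit) key compared against sorted(p) for each enumerated pattern, joining the matching indices.
import Mathlib
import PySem

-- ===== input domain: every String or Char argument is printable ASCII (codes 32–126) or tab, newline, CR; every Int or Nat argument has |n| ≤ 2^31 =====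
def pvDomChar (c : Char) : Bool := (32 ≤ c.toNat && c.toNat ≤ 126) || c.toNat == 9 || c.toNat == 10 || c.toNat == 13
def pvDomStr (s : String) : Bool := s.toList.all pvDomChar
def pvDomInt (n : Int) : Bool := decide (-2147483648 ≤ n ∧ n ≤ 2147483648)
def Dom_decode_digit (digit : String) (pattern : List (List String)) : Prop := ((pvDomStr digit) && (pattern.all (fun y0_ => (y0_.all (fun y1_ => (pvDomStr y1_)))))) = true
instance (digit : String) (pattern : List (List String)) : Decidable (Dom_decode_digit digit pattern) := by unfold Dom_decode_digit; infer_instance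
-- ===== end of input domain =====

-- B replaces A's copy-and-destructive-remove matching loop (plus its length guard) by comparing each
-- pattern's sorted form with the digit's precomputed sorted form (objective: simpler).

-- ===== PORT A =====
-- 'for letter in digit_letters: if letter in pattern: pattern.remove(letter) else: break'
-- (PySem.List.remove? pat l = none exactly when l ∉ pat, so the match mirrors the in-test + remove + break)
def pvRemoveLoop (letters : List String) (pat : List String) : List String :=
  match letters with
  | [] => pat
  | l :: ls =>
    match PySem.List.remove? pat l with
    | some pat' => pvRemoveLoop ls pat'
    | none => pat

def decode_digit (digit : String) (pattern : List (List String)) : String :=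
  let digit_letters : List String := digit.toList.map (fun c => String.ofList [c])
  let slotted_pattern : List (List String) :=
    (PySem.List.pyRange 0 (PySem.List.len pattern)).foldl
      (fun sp i =>
        -- 'slotted_pattern.append([])' then the inner j-loop appends into that fresh last row
        sp ++ [(PySem.List.pyRange 0 (PySem.List.len (PySem.List.pyGetD pattern i []))).foldl
                 (fun row j => row ++ [PySem.List.pyGetD (PySem.List.pyGetD pattern i []) j ""]) []]) []
  (PySem.List.pyRange 0 (PySem.List.len slotted_pattern)).foldl
    (fun output i =>
      let pat := PySem.List.slice (PySem.List.pyGetD slotted_pattern i [])  -- slotted_pattern[i][:]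
      if PySem.List.len pat ≠ PySem.List.len digit_letters then output
      else
        let pat' := pvRemoveLoop digit_letters pat
        if PySem.List.len pat' = 0 then output ++ PySem.Int.toStr i else output)
    ""

-- ===== PORT B =====
def decode_digit_alt (digit : String) (pattern : List (List String)) : String :=
  let key := PySem.List.sorted (digit.toList.map (fun c => String.ofList [c])) (fun x => x)
  PySem.Str.join ""
    ((PySem.List.enumerate pattern).filterMap
      (fun ip => if PySem.List.sorted ip.2 (fun x => x) = key then some (PySem.Int.toStr ip.1) else none))

-- ===== PRECONDITION & SPEC =====
def Spec_decode_digit (digit : String) (pattern : List (List String)) (out : String) : Prop := out = decode_digit_alt digit pattern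
instance (digit : String) (pattern : List (List String)) (out : String) : Decidable (Spec_decode_digit digit pattern out) := by unfold Spec_decode_digit; infer_instance

-- ===== CLAIM (what is proved, stated in full; the proofs are below) =====
def Claim_equal_decode_digit : Prop := ∀ (digit : String) (pattern : List (List String)), Dom_decode_digit digit pattern → Spec_decode_digit digit pattern (decode_digit digit pattern)

-- ===== LEMMAS AND PROOFS =====

-- A's slotted_pattern rebuild is the identity
lemma pv_inner_copy (row : List String) :
    (PySem.List.pyRange 0 (PySem.List.len row)).foldl (fun r j => r ++ [PySem.List.pyGetD row j ""]) [] = row := by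
  have h := PySem.List.foldl_pyRange_pyGetD row "" (fun r x => r ++ [x]) [] (a := 0) le_rfl
  simp only [Int.toNat_zero, List.drop_zero, PySem.List.foldl_append_singleton_eq_self,
    List.nil_append] at h
  exact h

lemma pv_slotted_copy (pattern : List (List String)) :
    (PySem.List.pyRange 0 (PySem.List.len pattern)).foldl
      (fun sp i =>
        sp ++ [(PySem.List.pyRange 0 (PySem.List.len (PySem.List.pyGetD pattern i []))).foldl
                 (fun row j => row ++ [PySem.List.pyGetD (PySem.List.pyGetD pattern i []) j ""]) []]) []
      = pattern := by
  have h := PySem.List.foldl_pyRange_pyGetD pattern []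
    (fun sp v => sp ++ [(PySem.List.pyRange 0 (PySem.List.len v)).foldl
        (fun r j => r ++ [PySem.List.pyGetD v j ""]) []]) [] (a := 0) le_rfl
  simp only [Int.toNat_zero, List.drop_zero] at h
  rw [h, PySem.List.foldl_append_singleton_eq_map
        (f := fun v => (PySem.List.pyRange 0 (PySem.List.len v)).foldl
          (fun r j => r ++ [PySem.List.pyGetD v j ""]) []),
      List.nil_append,
      List.map_congr_left (fun v _ => pv_inner_copy v), List.map_id']

-- the remove-loop empties pat exactly when pat is a permutation of the letters (given equal length)
lemma pv_removeLoop_of_perm : ∀ (dl pat : List String), dl.Perm pat → pvRemoveLoop dl pat = [] := by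
  intro dl
  induction dl with
  | nil => intro pat h; simpa [pvRemoveLoop] using (h.nil_eq).symm
  | cons l ls ih =>
    intro pat h
    have hmem : l ∈ pat := h.subset (List.mem_cons_self)
    have herase : ls.Perm (pat.erase l) :=
      (h.trans (List.perm_cons_erase hmem)).cons_inv
    simp [pvRemoveLoop, PySem.List.remove?_eq_some_erase pat l hmem, ih _ herase]

lemma pv_perm_of_removeLoop : ∀ (dl pat : List String),
    pat.length = dl.length → pvRemoveLoop dl pat = [] → dl.Perm pat := by
  intro dl
  induction dl with
  | nil =>
    intro pat hlen _
    simp_all [List.length_eq_zero_iff]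
  | cons l ls ih =>
    intro pat hlen hloop
    cases hr : PySem.List.remove? pat l with
    | none =>
      have : pat = [] := by simpa [pvRemoveLoop, hr] using hloop
      simp [this] at hlen
    | some pat' =>
      have hmem : l ∈ pat := by
        by_contra hnm
        rw [(PySem.List.remove?_eq_none_iff pat l).2 hnm] at hr
        simp at hr
      have hpe : pat' = pat.erase l := by
        have h2 := PySem.List.remove?_eq_some_erase pat l hmem
        rw [h2] at hr
        exact (Option.some_inj.mp hr).symm
      have hlen' : pat'.length = ls.length := by
        rw [hpe, List.length_erase_of_mem hmem, hlen]; simp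
      have hloop' : pvRemoveLoop ls pat' = [] := by
        simpa [pvRemoveLoop, hr] using hloop
      have hperm := ih pat' hlen' hloop'
      have h1 : (l :: ls).Perm (l :: pat') := hperm.cons l
      rw [hpe] at h1
      exact h1.trans (List.perm_cons_erase hmem).symm

-- per-pattern: A's test (length equal and the remove loop empties the copy) ↔ B's sorted comparison
lemma pv_cond_iff (dl pat : List String) :
    (pat.length = dl.length ∧ pvRemoveLoop dl pat = []) ↔
      PySem.List.sorted pat (fun x => x) = PySem.List.sorted dl (fun x => x) := by
  rw [PySem.List.sorted_id_eq_sorted_id_iff_perm]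
  constructor
  · rintro ⟨hlen, hloop⟩; exact (pv_perm_of_removeLoop dl pat hlen hloop).symm
  · intro hp; exact ⟨hp.length_eq, pv_removeLoop_of_perm dl pat hp.symm⟩

-- ''.join of a cons
lemma pv_join_empty_cons (x : String) (xs : List String) :
    PySem.Str.join "" (x :: xs) = x ++ PySem.Str.join "" xs := by
  cases xs with
  | nil => simp [PySem.Str.join, PySem.Chars.join_singleton, PySem.Chars.join_nil,
      String.ofList_toList]
  | cons y ys =>
    simp [PySem.Str.join, PySem.Chars.join_cons_cons]

-- the accumulating output loop is ''.join of the filtered indices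
lemma pv_foldl_join (c : Int × List String → Bool) :
    ∀ (l : List (Int × List String)) (acc : String),
      l.foldl (fun out p => if c p then out ++ PySem.Int.toStr p.1 else out) acc
        = acc ++ PySem.Str.join "" (l.filterMap
            (fun p => if c p then some (PySem.Int.toStr p.1) else none)) := by
  intro l
  induction l with
  | nil => intro acc; simp [PySem.Str.join, PySem.Chars.join_nil]
  | cons p ps ih =>
    intro acc
    by_cases hc : c p
    · simp only [List.foldl_cons, List.filterMap_cons, hc, if_pos, ih, pv_join_empty_cons,
        String.append_assoc]
    · simp only [List.foldl_cons, List.filterMap_cons, hc, ih]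
      simp

-- ===== VERDICT (by name: the statement is the Claim_ definition above) =====
theorem decode_digit_spec : Claim_equal_decode_digit := by
  intro digit pattern _
  show decode_digit digit pattern = decode_digit_alt digit pattern
  unfold decode_digit decode_digit_alt
  rw [pv_slotted_copy]
  set dl := digit.toList.map (fun c => String.ofList [c]) with hdl
  -- turn the index loop into a loop over enumerate pattern
  rw [show (PySem.List.pyRange 0 (PySem.List.len pattern)).foldl
      (fun output i =>
        let pat := PySem.List.slice (PySem.List.pyGetD pattern i [])
        if PySem.List.len pat ≠ PySem.List.len dl then output
        else
          let pat' := pvRemoveLoop dl pat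
          if PySem.List.len pat' = 0 then output ++ PySem.Int.toStr i else output) ""
      = (PySem.List.enumerate pattern).foldl
        (fun output p =>
          let pat := PySem.List.slice p.2
          if PySem.List.len pat ≠ PySem.List.len dl then output
          else
            let pat' := pvRemoveLoop dl pat
            if PySem.List.len pat' = 0 then output ++ PySem.Int.toStr p.1 else output) ""
    from by rw [PySem.List.enumerate_eq_map_pyRange pattern [], List.foldl_map]]
  -- per-element: rewrite A's body into B's test
  rw [PySem.List.foldl_congr_mem
      (l := PySem.List.enumerate pattern) (init := "")
      (f := fun output p =>
        let pat := PySem.List.slice p.2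
        if PySem.List.len pat ≠ PySem.List.len dl then output
        else
          let pat' := pvRemoveLoop dl pat
          if PySem.List.len pat' = 0 then output ++ PySem.Int.toStr p.1 else output)
      (g := fun output p =>
        if (decide (PySem.List.sorted p.2 (fun x => x) = PySem.List.sorted dl (fun x => x)))
        then output ++ PySem.Int.toStr p.1 else output)
      (by
        intro acc p _
        have hslice : PySem.List.slice p.2 = p.2 := by simp [PySem.List.slice]
        simp only [hslice, PySem.List.len_eq, ne_eq]
        by_cases hs : PySem.List.sorted p.2 (fun x => x) = PySem.List.sorted dl (fun x => x)
        · obtain ⟨hlen, hloop⟩ := (pv_cond_iff dl p.2).2 hs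
          simp [hs, hlen, hloop]
        · by_cases hlen : p.2.length = dl.length
          · have hloop : pvRemoveLoop dl p.2 ≠ [] :=
              fun h => hs ((pv_cond_iff dl p.2).1 ⟨hlen, h⟩)
            simp [hs, hlen, List.length_eq_zero_iff, hloop]
          · simp [hs, hlen])]
  rw [pv_foldl_join (fun p =>
      decide (PySem.List.sorted p.2 (fun x => x) = PySem.List.sorted dl (fun x => x)))]
  simp
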